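-- pv_equiv track=rewrite | github.com/RensaProject/recipe_to_rensa | recipe_to_rensa/Recipe.py | list_words_naturally
-- ===== SOURCE A (Python) =====
-- def list_words_naturally(arr):
--     finalString = ""
--     if arr:
--         for i in range(0, len(arr)):
--             concept=arr[i]
--             if (i<len(arr)-2):
--                 finalString += concept + ", "
--             elif (i==len(arr)-2):
--                 if (len(arr)==2):
--                     finalString+= concept + " and "
--                 else:
--                     finalString += concept + ", and "
--             else:
--                 finalString += concept
--     return finalString
-- ===== SOURCE B (Python) =====
-- def list_words_naturally(arr):
--     if not arr:
--         return ""
--     if len(arr) == 1: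
--         return arr[0]
--     head = ", ".join(arr[:-1])
--     sep = " and " if len(arr) == 2 else ", and "
--     return head + sep + arr[-1]
-- ===== Notes on version B (the rewrite author's own statement) =====
-- stated objective: simpler
-- what changed: Replaced the indexed loop with per-position branch logic by two guards plus a single ', '.join over arr[:-1] and one separator pick before appending arr[-1].
import Mathlib
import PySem

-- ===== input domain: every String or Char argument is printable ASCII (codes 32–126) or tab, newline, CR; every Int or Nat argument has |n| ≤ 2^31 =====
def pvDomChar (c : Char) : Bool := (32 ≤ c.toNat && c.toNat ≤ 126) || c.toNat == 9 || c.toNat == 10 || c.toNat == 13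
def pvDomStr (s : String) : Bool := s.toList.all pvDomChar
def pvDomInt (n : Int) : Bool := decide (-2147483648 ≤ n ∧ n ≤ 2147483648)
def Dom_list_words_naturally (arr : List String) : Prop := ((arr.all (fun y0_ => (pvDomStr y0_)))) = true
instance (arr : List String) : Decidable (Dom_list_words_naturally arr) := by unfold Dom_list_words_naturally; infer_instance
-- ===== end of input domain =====

-- B replaces A's indexed loop with position branches by two guards plus a ", ".join over arr[:-1]
-- and a single separator pick before appending arr[-1] (objective: simpler; same cost).


-- ===== PORT A =====
-- the loop body of A ('finalString += …' with the position branches), as a named step function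
def lwnStep (arr : List String) (finalString : String) (i : Int) : String :=
  let concept := PySem.List.pyGetD arr i ""
  if i < (arr.length : Int) - 2 then finalString ++ (concept ++ ", ")
  else if i = (arr.length : Int) - 2 then
    if (arr.length : Int) = 2 then finalString ++ (concept ++ " and ")
    else finalString ++ (concept ++ ", and ")
  else finalString ++ concept

def list_words_naturally (arr : List String) : String :=
  if arr ≠ [] then
    (PySem.List.pyRange 0 (arr.length : Int) 1).foldl (lwnStep arr) ""
  else ""

-- ===== PORT B =====
def list_words_naturally_alt (arr : List String) : String :=
  if arr = [] then ""
  else if arr.length = 1 then (PySem.List.pyGet? arr 0).getD ""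
  else
    let head := PySem.Str.join ", " (PySem.List.slice arr none (some (-1)))
    let sep := if arr.length = 2 then " and " else ", and "
    head ++ sep ++ (PySem.List.pyGet? arr (-1)).getD ""

-- ===== PRECONDITION & SPEC =====
def Spec_list_words_naturally (arr : List String) (out : String) : Prop := out = list_words_naturally_alt arr
instance (arr : List String) (out : String) : Decidable (Spec_list_words_naturally arr out) := by unfold Spec_list_words_naturally; infer_instance

-- ===== CLAIM (what is proved, stated in full; the proofs are below) =====
def Claim_equal_list_words_naturally : Prop := ∀ (arr : List String), Dom_list_words_naturally arr → Spec_list_words_naturally arr (list_words_naturally arr)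

-- ===== LEMMAS AND PROOFS =====

-- the contribution of index i to A's string, without the accumulator
def lwnPiece (arr : List String) (i : Int) : String :=
  let concept := PySem.List.pyGetD arr i ""
  if i < (arr.length : Int) - 2 then concept ++ ", "
  else if i = (arr.length : Int) - 2 then
    if (arr.length : Int) = 2 then concept ++ " and "
    else concept ++ ", and "
  else concept

theorem lwnStep_eq_append (arr : List String) (s : String) (i : Int) :
    lwnStep arr s i = s ++ lwnPiece arr i := by
  unfold lwnStep lwnPiece
  split_ifs <;> rfl

theorem foldl_lwnStep_toList (arr : List String) (l : List Int) (s : String) :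
    (l.foldl (lwnStep arr) s).toList
      = s.toList ++ (l.map (fun i => (lwnPiece arr i).toList)).flatten := by
  induction l generalizing s with
  | nil => simp
  | cons i t ih =>
      simp only [List.foldl_cons, List.map_cons, List.flatten_cons, ih,
        lwnStep_eq_append, String.toList_append, List.append_assoc]

-- ", ".join(ys ++ [y]) unfolded to a flatten, at the char level
theorem join_snoc_toList (sep : List Char) (ys : List (List Char)) (y : List Char) :
    PySem.Chars.join sep (ys ++ [y]) = (ys.map (· ++ sep)).flatten ++ y := by
  induction ys with
  | nil => simp [PySem.Chars.join_singleton]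
  | cons z t ih =>
      cases t with
      | nil => simp [PySem.Chars.join_cons_cons, PySem.Chars.join_singleton]
      | cons w u =>
          rw [List.cons_append, show w :: u ++ [y] = w :: (u ++ [y]) from rfl,
            PySem.Chars.join_cons_cons]
          simp only [List.cons_append] at ih
          simp [ih, List.append_assoc]

theorem map_range_getD (arr : List String) (m : Nat) (h : m ≤ arr.length) :
    (List.range m).map (fun k => arr.getD k "") = arr.take m := by
  induction m with
  | zero => simp
  | succ m ih =>
      rw [List.range_succ, List.map_append, ih (by omega), List.take_add_one]
      have hm : m < arr.length := by omega
      simp [List.getD, hm]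

theorem lwnPiece_lt (arr : List String) (k : Nat) (h : k + 2 < arr.length) :
    lwnPiece arr ↑k = arr.getD k "" ++ ", " := by
  unfold lwnPiece
  rw [if_pos (by omega)]
  simp

theorem lwnPiece_mid (arr : List String) (m : Nat) (h : arr.length = m + 2) (hm : 1 ≤ m) :
    lwnPiece arr ↑m = arr.getD m "" ++ ", and " := by
  unfold lwnPiece
  rw [if_neg (by omega), if_pos (by omega), if_neg (by omega)]
  simp

theorem lwnPiece_last (arr : List String) (m : Nat) (h : arr.length = m + 2) :
    lwnPiece arr ↑(m + 1) = arr.getD (m + 1) "" := by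
  unfold lwnPiece
  rw [if_neg (by omega), if_neg (by omega)]
  exact PySem.List.pyGetD_natCast arr (m + 1) ""

-- ===== VERDICT (by name: the statement is the Claim_ definition above) =====
theorem list_words_naturally_spec : Claim_equal_list_words_naturally := by
  intro arr _
  unfold Spec_list_words_naturally
  by_cases h0 : arr = []
  · subst h0; rfl
  by_cases h1 : arr.length = 1
  · obtain ⟨a, rfl⟩ := List.length_eq_one_iff.mp h1
    have hr : PySem.List.pyRange 0 (1 : Int) 1 = [0] := by decide
    simp [list_words_naturally, list_words_naturally_alt, hr, lwnStep]
  by_cases h2 : arr.length = 2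
  · obtain ⟨a, b, rfl⟩ := List.length_eq_two.mp h2
    have hr : PySem.List.pyRange 0 (2 : Int) 1 = [0, 1] := by decide
    apply String.toList_inj.mp
    simp [list_words_naturally, list_words_naturally_alt, hr, lwnStep,
      PySem.Str.toList_join, PySem.Chars.join_singleton, PySem.List.slice_to_neg_one,
      String.toList_append, PySem.List.pyGetD, PySem.List.pyGet?, PySem.List.pyIdx?]
  · -- length ≥ 3
    have hlen : 1 ≤ arr.length := List.length_pos_of_ne_nil h0
    obtain ⟨m, hm, hm1⟩ : ∃ m, arr.length = m + 2 ∧ 1 ≤ m := ⟨arr.length - 2, by omega, by omega⟩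
    apply String.toList_inj.mp
    rw [show list_words_naturally arr
          = (PySem.List.pyRange 0 (arr.length : Int) 1).foldl (lwnStep arr) "" from by
        simp [list_words_naturally, h0]]
    rw [foldl_lwnStep_toList, PySem.List.pyRange_zero_natCast]
    simp only [List.map_map, Function.comp_def]
    rw [show (List.range arr.length) = List.range m ++ [m] ++ [m + 1] from by
      rw [hm, List.range_succ, List.range_succ]]
    rw [List.map_append, List.map_append, List.flatten_append, List.flatten_append]
    rw [List.map_congr_left (l := List.range m)
      (f := fun k => (lwnPiece arr ↑k).toList)
      (g := fun k => ((arr.getD k "" ++ ", ")).toList)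
      (fun k hk => by
        show (lwnPiece arr ↑k).toList = (arr.getD k "" ++ ", ").toList
        rw [lwnPiece_lt arr k (by simp at hk; omega)])]
    have hmap : (List.range m).map (fun k => ((arr.getD k "" ++ ", ")).toList)
        = (arr.take m).map (fun w => w.toList ++ (", " : String).toList) := by
      have := map_range_getD arr m (by omega)
      calc (List.range m).map (fun k => ((arr.getD k "" ++ ", ")).toList)
          = ((List.range m).map (fun k => arr.getD k "")).map
              (fun w => (w ++ ", ").toList) := by simp [List.map_map, Function.comp_def]
        _ = (arr.take m).map (fun w => w.toList ++ (", " : String).toList) := by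
              rw [this]; simp [String.toList_append]
    rw [hmap]
    simp only [List.map_cons, List.map_nil, List.flatten_cons, List.flatten_nil,
      lwnPiece_mid arr m hm hm1, lwnPiece_last arr m hm]
    -- B side
    rw [show list_words_naturally_alt arr
          = PySem.Str.join ", " (PySem.List.slice arr none (some (-1)))
            ++ ", and " ++ (PySem.List.pyGet? arr (-1)).getD "" from by
        simp [list_words_naturally_alt, h0, h1, h2]]
    rw [PySem.List.slice_to_neg_one, PySem.List.pyGet?_neg_one]
    have hdl : arr.dropLast = arr.take m ++ [arr.getD m ""] := by
      rw [List.dropLast_eq_take, hm]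
      rw [show m + 2 - 1 = m + 1 from rfl, List.take_add_one]
      have hmlt : m < arr.length := by omega
      simp [List.getD, hmlt]
    have hlast : arr.getLast?.getD "" = arr.getD (m + 1) "" := by
      rw [List.getLast?_eq_getElem?, hm]
      simp [List.getD, show m + 2 - 1 = m + 1 from rfl]
    rw [hdl, hlast]
    simp only [String.toList_append, PySem.Str.toList_join, List.map_append,
      List.map_cons, List.map_nil, join_snoc_toList, List.map_map]
    simp [Function.comp_def, List.append_assoc]
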